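-- pv_equiv track=rewrite | github.com/arissa/google-code-jam | allyourbase.py | to_base_ten
-- ===== SOURCE A (Python) =====
-- def to_base_ten(string, base):
-- 	answer = 0
-- 	number = int(string)
-- 	digit = 0
-- 	while number:
-- 		answer += (number%10)*(pow(base,digit))
-- 		digit += 1
-- 		number= number//10
-- 	return answer
-- ===== SOURCE B (Python) =====
-- def to_base_ten(string, base):
-- 	result = 0
-- 	for ch in str(int(string)):
-- 		result = result * base + (ord(ch) - 48)
-- 	return result
-- ===== Notes on version B (the rewrite author's own statement) =====
-- stated objective: idiomatic
-- what changed: Replaces A's least-significant-first sum of digit*base**position (with a maintained power counter) by Horner's method: a single multiply-accumulate pass over str(int(string)) most-significant digit first, with no pow; Pre_ excludes strings int() rejects (A raises ValueError) and negative values (A's while-loop never terminates).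
import Mathlib
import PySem

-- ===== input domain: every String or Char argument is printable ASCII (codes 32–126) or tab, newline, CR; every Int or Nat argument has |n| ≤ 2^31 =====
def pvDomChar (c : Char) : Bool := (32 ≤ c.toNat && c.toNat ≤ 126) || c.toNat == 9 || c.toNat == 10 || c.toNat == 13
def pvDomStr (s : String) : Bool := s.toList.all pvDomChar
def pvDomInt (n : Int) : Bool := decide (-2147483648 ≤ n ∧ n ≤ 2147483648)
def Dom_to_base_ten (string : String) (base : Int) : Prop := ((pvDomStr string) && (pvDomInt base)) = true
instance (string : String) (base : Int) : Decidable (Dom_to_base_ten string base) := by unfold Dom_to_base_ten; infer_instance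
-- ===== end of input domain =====

-- B replaces A's digit*base**position sum (least-significant first, power counter) by a
-- Horner multiply-accumulate over the decimal string, most-significant digit first (idiomatic, no pow).

-- ===== PORT A =====
-- A's while-loop: 'while number: answer += (number%10)*pow(base,digit); digit += 1; number //= 10'.
-- For number < 0 the Python loop never terminates (number//10 stays at -1); Pre_ excludes those
-- inputs, so the '0 < number' guard below deviates from 'number != 0' only where Python diverges.
def to_base_ten_loop (base number answer : Int) (digit : Nat) : Int :=
  if h : 0 < number then
    to_base_ten_loop base (PySem.Int.floordiv number 10)
      (answer + (PySem.Int.mod number 10) * base ^ digit) (digit + 1)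
  else answer
termination_by number.toNat
decreasing_by
  have h10 : PySem.Int.floordiv number 10 = number / 10 :=
    PySem.Int.floordiv_eq_ediv_of_pos (by norm_num)
  rw [h10]; omega

def to_base_ten (string : String) (base : Int) : Int :=
  match PySem.Int.ofStr? string with
  | none => 0            -- int(string) raises ValueError: excluded by Pre_
  | some number => to_base_ten_loop base number 0 0

-- ===== PORT B =====
-- Source B: result = 0; for ch in str(int(string)): result = result * base + (ord(ch) - 48)
def to_base_ten_alt (string : String) (base : Int) : Int :=
  match PySem.Int.ofStr? string with
  | none => 0            -- int(string) raises ValueError: excluded by Pre_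
  | some n =>
      (PySem.Int.toStr n).toList.foldl (fun result ch => result * base + ((ch.toNat : Int) - 48)) 0

-- ===== PRECONDITION & SPEC =====
-- Pre_ excludes strings int() rejects (A raises ValueError) and strings whose value is negative
-- (A's while-loop never terminates there: number//10 converges to -1).
def Pre_to_base_ten (string : String) (base : Int) : Prop :=
  (PySem.Int.ofStr? string).isSome = true ∧ 0 ≤ (PySem.Int.ofStr? string).getD 0
instance (string : String) (base : Int) : Decidable (Pre_to_base_ten string base) := by
  unfold Pre_to_base_ten; infer_instance

def pvWitness_to_base_ten : String × Int := ("123", 7)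

def Spec_to_base_ten (string : String) (base : Int) (out : Int) : Prop := out = to_base_ten_alt string base
instance (string : String) (base : Int) (out : Int) : Decidable (Spec_to_base_ten string base out) := by unfold Spec_to_base_ten; infer_instance

-- ===== CLAIM (what is proved, stated in full; the proofs are below) =====
def Claim_equal_to_base_ten : Prop := ∀ (string : String) (base : Int), Dom_to_base_ten string base → Pre_to_base_ten string base → Spec_to_base_ten string base (to_base_ten string base)

-- ===== LEMMAS AND PROOFS =====

-- the common value: decimal digits of m read in base `base`
def pvVal (base : Int) (m : Nat) : Int :=
  if m = 0 then 0 else pvVal base (m / 10) * base + ((m % 10 : Nat) : Int)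
termination_by m
decreasing_by omega

theorem pvVal_zero (base : Int) : pvVal base 0 = 0 := by rw [pvVal]; simp

theorem pvVal_pos (base : Int) (m : Nat) (h : m ≠ 0) :
    pvVal base m = pvVal base (m / 10) * base + ((m % 10 : Nat) : Int) := by
  rw [pvVal]; simp [h]

-- A's loop computes answer + base^digit * pvVal
theorem loopA_eq (base : Int) (m : Nat) : ∀ (a : Int) (d : Nat),
    to_base_ten_loop base (m : Int) a d = a + base ^ d * pvVal base m := by
  induction m using Nat.strong_induction_on with
  | _ m ih =>
    intro a d
    rw [to_base_ten_loop]
    by_cases hm : m = 0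
    · subst hm; simp [pvVal_zero]
    · have hpos : (0:Int) < (m : Int) := by exact_mod_cast Nat.pos_of_ne_zero hm
      rw [dif_pos hpos]
      have hfd : PySem.Int.floordiv (m : Int) 10 = ((m / 10 : Nat) : Int) := by
        exact_mod_cast PySem.Int.floordiv_natCast m 10
      have hmd : PySem.Int.mod (m : Int) 10 = ((m % 10 : Nat) : Int) := by
        exact_mod_cast PySem.Int.mod_natCast m 10
      rw [hfd, hmd, ih (m / 10) (by omega)]
      rw [pvVal_pos base m hm]
      ring

-- Nat.toDigitsCore: trailing accumulator is an append
theorem toDigitsCore_acc (b : Nat) : ∀ (fuel n : Nat) (l : List Char),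
    Nat.toDigitsCore b fuel n l = Nat.toDigitsCore b fuel n [] ++ l := by
  intro fuel
  induction fuel with
  | zero => intro n l; simp [Nat.toDigitsCore]
  | succ fuel ih =>
    intro n l
    simp only [Nat.toDigitsCore]
    by_cases h : n / b = 0
    · simp [h]
    · simp only [h, if_neg h]
      rw [ih (n / b) [Nat.digitChar (n % b)], ih (n / b) (Nat.digitChar (n % b) :: l)]
      simp

-- fuel irrelevance above n
theorem toDigitsCore_fuel : ∀ (f1 f2 n : Nat), n < f1 → n < f2 →
    Nat.toDigitsCore 10 f1 n [] = Nat.toDigitsCore 10 f2 n [] := by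
  intro f1
  induction f1 with
  | zero => intro f2 n h1 _; omega
  | succ f1 ih =>
    intro f2 n h1 h2
    cases f2 with
    | zero => omega
    | succ f2 =>
      simp only [Nat.toDigitsCore]
      by_cases h : n / 10 = 0
      · simp [h]
      · simp only [h, if_neg h]
        rw [toDigitsCore_acc, toDigitsCore_acc 10 f2]
        rw [ih f2 (n / 10) (by omega) (by omega)]

-- structural recurrence for Nat.toDigits 10
theorem toDigits_rec (m : Nat) (h : 10 ≤ m) :
    Nat.toDigits 10 m = Nat.toDigits 10 (m / 10) ++ [Nat.digitChar (m % 10)] := by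
  unfold Nat.toDigits
  conv_lhs => rw [Nat.toDigitsCore]
  have h10 : m / 10 ≠ 0 := by omega
  simp only [h10, if_neg h10]
  rw [toDigitsCore_acc]
  rw [toDigitsCore_fuel m (m / 10 + 1) (m / 10) (by omega) (by omega)]
  simp

theorem toDigits_lt10 (m : Nat) (h : m < 10) : Nat.toDigits 10 m = [Nat.digitChar m] := by
  unfold Nat.toDigits
  rw [Nat.toDigitsCore]
  have h10 : m / 10 = 0 := by omega
  simp [h10, Nat.mod_eq_of_lt h]

theorem digitChar_toNat (d : Nat) (h : d < 10) : ((Nat.digitChar d).toNat : Int) - 48 = (d : Int) := by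
  interval_cases d <;> decide

-- B's Horner fold over the decimal digits computes pvVal
theorem horner_eq (base : Int) (m : Nat) :
    (Nat.toDigits 10 m).foldl (fun result ch => result * base + ((ch.toNat : Int) - 48)) 0
      = pvVal base m := by
  induction m using Nat.strong_induction_on with
  | _ m ih =>
    by_cases h10 : m < 10
    · rw [toDigits_lt10 m h10, List.foldl_cons, List.foldl_nil,
        digitChar_toNat m h10]
      by_cases hm : m = 0
      · subst hm; simp [pvVal_zero]
      · rw [pvVal_pos base m hm, Nat.div_eq_of_lt h10, pvVal_zero,
          Nat.mod_eq_of_lt h10]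
        try ring
    · rw [toDigits_rec m (by omega), List.foldl_append, List.foldl_cons, List.foldl_nil,
        ih (m / 10) (by omega), digitChar_toNat (m % 10) (by omega)]
      rw [pvVal_pos base m (by omega)]

-- ===== VERDICT (by name: the statement is the Claim_ definition above) =====
theorem to_base_ten_spec : Claim_equal_to_base_ten := by
  intro string base _hdom hpre
  obtain ⟨hsome, hnn⟩ := hpre
  unfold Spec_to_base_ten to_base_ten to_base_ten_alt
  cases hn : PySem.Int.ofStr? string with
  | none => rw [hn] at hsome
  | some n =>
    rw [hn] at hnn
    simp only [Option.getD_some] at hnn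
    show to_base_ten_loop base n 0 0
      = (PySem.Int.toStr n).toList.foldl (fun result ch => result * base + ((ch.toNat : Int) - 48)) 0
    have hm : n = ((n.toNat : Nat) : Int) := by omega
    rw [hm, loopA_eq base n.toNat 0 0]
    have htc : (PySem.Int.toStr ((n.toNat : Nat) : Int)).toList
        = Nat.toDigits 10 n.toNat := by
      rw [PySem.Int.toList_toStr]
      unfold PySem.Int.toChars
      have h1 : ¬ (((n.toNat : Nat) : Int) < 0) := by omega
      simp only [h1, if_false]
      have h2 : ((n.toNat : Nat) : Int).toNat = n.toNat := Int.toNat_natCast _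
      rw [h2]
    rw [htc, horner_eq base n.toNat]
    try ring
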